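-- pv_equiv track=rewrite | github.com/JFrunk/bridge-bidding-app | backend/engine/v2/features/enhanced_extractor.py | _get_lho_bids
-- ===== SOURCE A (Python) =====
-- from typing import Dict, Any, Optional, List
--
-- def _get_lho_bids(auction_history: List[str], my_position: str, dealer: str = 'North') -> List[str]:
--     """
--     Extract Left Hand Opponent's bids from the auction history.
--
--     Args:
--         auction_history: List of bids in order
--         my_position: My position (North, East, South, West)
--         dealer: Dealer position (determines bid indexing)
--
--     Returns:
--         List of LHO's bids in order
--     """
--     positions = ['North', 'East', 'South', 'West']
--     my_idx = positions.index(my_position) if my_position in positions else 0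
--     dealer_idx = positions.index(dealer) if dealer in positions else 0
--     lho_idx = (my_idx + 1) % 4  # LHO is to my left (bids after me)
--
--     lho_bids = []
--     for i, bid in enumerate(auction_history):
--         # Position of bid i = (dealer_idx + i) % 4
--         bid_position_idx = (dealer_idx + i) % 4
--         if bid_position_idx == lho_idx:
--             lho_bids.append(bid)
--
--     return lho_bids
-- ===== SOURCE B (Python) =====
-- from typing import List
--
-- POSITION_INDEX = {'North': 0, 'East': 1, 'South': 2, 'West': 3}
--
-- def _get_lho_bids(auction_history: List[str], my_position: str, dealer: str = 'North') -> List[str]: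
--     my_idx = POSITION_INDEX.get(my_position, 0)
--     dealer_idx = POSITION_INDEX.get(dealer, 0)
--     start = (my_idx + 1 - dealer_idx) % 4
--     return auction_history[start::4]
-- ===== Notes on version B (the rewrite author's own statement) =====
-- stated objective: simpler
-- what changed: Replaces A's positions-list membership test + .index() and the enumerate loop with its per-element (dealer_idx+i)%4 filter by a dict lookup with default 0 and one offset computation, returning the step-4 slice auction_history[start::4].
import Mathlib
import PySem

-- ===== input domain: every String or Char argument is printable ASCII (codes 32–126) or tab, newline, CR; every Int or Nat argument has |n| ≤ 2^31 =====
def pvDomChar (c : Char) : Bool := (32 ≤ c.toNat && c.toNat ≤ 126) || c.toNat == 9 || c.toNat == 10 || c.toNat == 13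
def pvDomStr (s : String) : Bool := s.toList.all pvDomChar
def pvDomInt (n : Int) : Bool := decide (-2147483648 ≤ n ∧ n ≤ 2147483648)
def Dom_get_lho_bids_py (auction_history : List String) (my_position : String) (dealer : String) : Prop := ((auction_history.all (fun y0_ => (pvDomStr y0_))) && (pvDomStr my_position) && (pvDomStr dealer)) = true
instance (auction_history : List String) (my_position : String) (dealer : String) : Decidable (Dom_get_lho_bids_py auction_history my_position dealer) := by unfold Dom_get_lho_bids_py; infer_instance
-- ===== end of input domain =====

-- B replaces A's positions-list membership/index computation and its enumerate loop
-- with a per-element modulo filter by a dict lookup (default 0) and a single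
-- step-4 slice (objective: simpler).

-- ===== PORT A =====
def get_lho_bids_py (auction_history : List String) (my_position : String) (dealer : String) : List String :=
  let positions : List String := ["North", "East", "South", "West"]
  let my_idx : Int := if my_position ∈ positions then ((PySem.List.index? positions my_position).getD 0 : Nat) else 0
  let dealer_idx : Int := if dealer ∈ positions then ((PySem.List.index? positions dealer).getD 0 : Nat) else 0
  let lho_idx : Int := PySem.Int.mod (my_idx + 1) 4
  (PySem.List.enumerate auction_history).foldl
    (fun lho_bids p =>
      if PySem.Int.mod (dealer_idx + p.1) 4 = lho_idx then lho_bids ++ [p.2] else lho_bids) []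

-- ===== PORT B =====
-- the module-level POSITION_INDEX dict of Source B
def pvPositionIndex : PySem.Dict String Int :=
  PySem.Dict.ofList [("North", 0), ("East", 1), ("South", 2), ("West", 3)]

-- hand port of the step-4 tail of a list (elements 0, 4, 8, … of its argument)
def pvStride4 {α : Type} : List α → List α
  | [] => []
  | x :: xs => x :: pvStride4 (xs.drop 3)
termination_by xs => xs.length
decreasing_by simp

def get_lho_bids_py_alt (auction_history : List String) (my_position : String) (dealer : String) : List String :=
  let my_idx : Int := pvPositionIndex.getD my_position 0
  let dealer_idx : Int := pvPositionIndex.getD dealer 0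
  let start : Int := PySem.Int.mod (my_idx + 1 - dealer_idx) 4
  -- hand port of auction_history[start::4]: 0 ≤ start (Python % 4), positive step,
  -- so the slice is exactly "drop start, then every 4th element"
  pvStride4 (auction_history.drop start.toNat)

-- ===== PRECONDITION & SPEC =====
def Spec_get_lho_bids_py (auction_history : List String) (my_position : String) (dealer : String) (out : List String) : Prop := out = get_lho_bids_py_alt auction_history my_position dealer
instance (auction_history : List String) (my_position : String) (dealer : String) (out : List String) : Decidable (Spec_get_lho_bids_py auction_history my_position dealer out) := by unfold Spec_get_lho_bids_py; infer_instance

-- ===== CLAIM (what is proved, stated in full; the proofs are below) =====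
def Claim_equal_get_lho_bids_py : Prop := ∀ (auction_history : List String) (my_position : String) (dealer : String), Dom_get_lho_bids_py auction_history my_position dealer → Spec_get_lho_bids_py auction_history my_position dealer (get_lho_bids_py auction_history my_position dealer)

-- ===== LEMMAS AND PROOFS =====

-- the literal items list of pvPositionIndex
lemma pvPI_mk : pvPositionIndex = PySem.Dict.mk [("North", 0), ("East", 1), ("South", 2), ("West", 3)] := by decide

-- A's "positions.index(s) if s in positions else 0" equals B's POSITION_INDEX.get(s, 0)
lemma pv_idx_eq (s : String) :
    (if s ∈ ["North", "East", "South", "West"] then (((PySem.List.index? ["North", "East", "South", "West"] s).getD 0 : Nat) : Int) else 0)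
      = pvPositionIndex.getD s 0 := by
  by_cases h1 : s = "North"; · subst h1; decide
  by_cases h2 : s = "East"; · subst h2; decide
  by_cases h3 : s = "South"; · subst h3; decide
  by_cases h4 : s = "West"; · subst h4; decide
  have hm : s ∉ ["North", "East", "South", "West"] := by simp [h1, h2, h3, h4]
  rw [if_neg hm, pvPI_mk]
  simp [PySem.Dict.getD_eq_get?_getD, beq_iff_eq,
        Ne.symm h1, Ne.symm h2, Ne.symm h3, Ne.symm h4, PySem.Dict.get?]

-- ((a % 4) - b) % 4 = (a - b) % 4  in Python's mod
lemma pv_mod_sub (a b : Int) :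
    PySem.Int.mod (PySem.Int.mod a 4 - b) 4 = PySem.Int.mod (a - b) 4 := by
  rw [PySem.Int.mod_eq_emod_of_pos (by norm_num : (0:Int) < 4),
      PySem.Int.mod_eq_emod_of_pos (by norm_num : (0:Int) < 4),
      PySem.Int.mod_eq_emod_of_pos (by norm_num : (0:Int) < 4)]
  omega

-- the elements of xs whose index i (counting from the index giving counter value c)
-- satisfies (c + i) % 4 = l
def pvSel (c l : Int) : List String → List String
  | [] => []
  | x :: t => (if PySem.Int.mod c 4 = l then [x] else []) ++ pvSel (c + 1) l t

lemma pvSel_cons (c l : Int) (x : String) (t : List String) :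
    pvSel c l (x :: t) = (if PySem.Int.mod c 4 = l then [x] else []) ++ pvSel (c + 1) l t := rfl

lemma pvStride4_nil {α : Type} : pvStride4 ([] : List α) = [] := by rw [pvStride4]

lemma pvStride4_cons {α : Type} (x : α) (xs : List α) :
    pvStride4 (x :: xs) = x :: pvStride4 (xs.drop 3) := by rw [pvStride4]

lemma pv_enum_fold (xs : List String) (d l : Int) : ∀ (j : Int) (acc : List String),
    (PySem.List.enumerate xs j).foldl
      (fun lho_bids p => if PySem.Int.mod (d + p.1) 4 = l then lho_bids ++ [p.2] else lho_bids) acc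
    = acc ++ pvSel (d + j) l xs := by
  induction xs with
  | nil => intro j acc; simp [PySem.List.enumerate_nil, pvSel]
  | cons x t ih =>
    intro j acc
    rw [PySem.List.enumerate_cons, List.foldl_cons, ih (j + 1), pvSel_cons]
    have : d + (j + 1) = d + j + 1 := by ring
    rw [this]
    split_ifs <;> simp

lemma pv_sel_stride (xs : List String) : ∀ (c l : Int), 0 ≤ l → l < 4 →
    pvSel c l xs = pvStride4 (xs.drop (PySem.Int.mod (l - c) 4).toNat) := by
  induction xs with
  | nil => intro c l _ _; simp [pvSel, pvStride4_nil]
  | cons x t ih =>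
    intro c l hl0 hl4
    rw [pvSel_cons, PySem.Int.mod_eq_emod_of_pos (by norm_num : (0:Int) < 4),
        PySem.Int.mod_eq_emod_of_pos (by norm_num : (0:Int) < 4)]
    by_cases h : c % 4 = l
    · have hs : ((l - c) % 4).toNat = 0 := by omega
      rw [if_pos h, hs, List.drop_zero, pvStride4_cons,
          ih (c + 1) l hl0 hl4,
          PySem.Int.mod_eq_emod_of_pos (by norm_num : (0:Int) < 4)]
      have h3 : ((l - (c + 1)) % 4).toNat = 3 := by omega
      rw [h3]
      simp
    · have hs : 1 ≤ ((l - c) % 4).toNat := by omega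
      obtain ⟨n, hn⟩ : ∃ n, ((l - c) % 4).toNat = n + 1 := ⟨_, (Nat.succ_pred_eq_of_pos hs).symm⟩
      rw [if_neg h, hn, List.drop_succ_cons,
          ih (c + 1) l hl0 hl4,
          PySem.Int.mod_eq_emod_of_pos (by norm_num : (0:Int) < 4)]
      have hm : ((l - (c + 1)) % 4).toNat = n := by omega
      rw [hm]
      simp

-- ===== VERDICT (by name: the statement is the Claim_ definition above) =====
theorem get_lho_bids_py_spec : Claim_equal_get_lho_bids_py := by
  unfold Claim_equal_get_lho_bids_py
  intro xs m d _
  unfold Spec_get_lho_bids_py get_lho_bids_py get_lho_bids_py_alt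
  simp only
  rw [← pv_idx_eq m, ← pv_idx_eq d]
  set my_idx : Int := if m ∈ ["North", "East", "South", "West"] then ((PySem.List.index? ["North", "East", "South", "West"] m).getD 0 : Nat) else 0 with hmy
  set dealer_idx : Int := if d ∈ ["North", "East", "South", "West"] then ((PySem.List.index? ["North", "East", "South", "West"] d).getD 0 : Nat) else 0 with hdi
  have hl0 : 0 ≤ PySem.Int.mod (my_idx + 1) 4 := by
    rw [PySem.Int.mod_eq_emod_of_pos (by norm_num : (0:Int) < 4)]; omega
  have hl4 : PySem.Int.mod (my_idx + 1) 4 < 4 := by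
    rw [PySem.Int.mod_eq_emod_of_pos (by norm_num : (0:Int) < 4)]; omega
  have h1 := pv_enum_fold xs dealer_idx (PySem.Int.mod (my_idx + 1) 4) 0 []
  rw [show PySem.List.enumerate xs = PySem.List.enumerate xs 0 from rfl] at *
  simp only [add_zero] at h1
  rw [h1, List.nil_append,
      pv_sel_stride xs dealer_idx (PySem.Int.mod (my_idx + 1) 4) hl0 hl4,
      pv_mod_sub (my_idx + 1) dealer_idx]
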